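-- pv_equiv track=rewrite | github.com/AntonFender/MovingOrganizationsOnPuppet | ConnectMongo.py | innerDict
-- ===== SOURCE A (Python) =====
-- def innerDict(get_group_id_title, DbrefsIdAndIP):
--     """Объеденяем два словаря"""
--     glossary = {}
--     resault_edit_fsrar = {}
--     resault_orig_fsrar = {}
--     for i in get_group_id_title:
--         for j in DbrefsIdAndIP:
--             if i == DbrefsIdAndIP[j]:
--                 glossary[j] = get_group_id_title[i]
--     for fsrar in glossary:
--         fsrar_edit = 'cash-' + str(fsrar[1:]) + '-' + str(fsrar[1:]) + '1'
--         org = glossary[fsrar]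
--         if org in resault_edit_fsrar:
--             resault_edit_fsrar[org].append(fsrar_edit)
--         else:
--             resault_edit_fsrar[org] = [fsrar_edit]
--         if org in resault_orig_fsrar:
--             resault_orig_fsrar[org].append(fsrar)
--         else:
--             resault_orig_fsrar[org] = [fsrar]
--     return resault_edit_fsrar, resault_orig_fsrar
-- ===== SOURCE B (Python) =====
-- def innerDict(get_group_id_title, DbrefsIdAndIP):
--     """Reverse-index join (value -> keys), then group by each distinct org via filtering."""
--     rev = {}
--     for j, ip in DbrefsIdAndIP.items():
--         rev.setdefault(ip, []).append(j)
--     pairs = [(f, org) for i, org in get_group_id_title.items() for f in rev.get(i, [])]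
--     orgs = []
--     for _, org in pairs:
--         if org not in orgs:
--             orgs.append(org)
--     resault_orig_fsrar = {org: [f for f, o in pairs if o == org] for org in orgs}
--     resault_edit_fsrar = {org: ['cash-' + f[1:] + '-' + f[1:] + '1' for f in fs]
--                           for org, fs in resault_orig_fsrar.items()}
--     return resault_edit_fsrar, resault_orig_fsrar
-- ===== Notes on version B (the rewrite author's own statement) =====
-- stated objective: faster
-- what changed: Replaces A's nested scan (for every key of get_group_id_title, a full pass over DbrefsIdAndIP) and its fold-with-contains grouping by a reverse index value->keys built once, a flat list of joined (fsrar, org) pairs, and grouping expressed as one filtered run per distinct org; output order preserved.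
import Mathlib
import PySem

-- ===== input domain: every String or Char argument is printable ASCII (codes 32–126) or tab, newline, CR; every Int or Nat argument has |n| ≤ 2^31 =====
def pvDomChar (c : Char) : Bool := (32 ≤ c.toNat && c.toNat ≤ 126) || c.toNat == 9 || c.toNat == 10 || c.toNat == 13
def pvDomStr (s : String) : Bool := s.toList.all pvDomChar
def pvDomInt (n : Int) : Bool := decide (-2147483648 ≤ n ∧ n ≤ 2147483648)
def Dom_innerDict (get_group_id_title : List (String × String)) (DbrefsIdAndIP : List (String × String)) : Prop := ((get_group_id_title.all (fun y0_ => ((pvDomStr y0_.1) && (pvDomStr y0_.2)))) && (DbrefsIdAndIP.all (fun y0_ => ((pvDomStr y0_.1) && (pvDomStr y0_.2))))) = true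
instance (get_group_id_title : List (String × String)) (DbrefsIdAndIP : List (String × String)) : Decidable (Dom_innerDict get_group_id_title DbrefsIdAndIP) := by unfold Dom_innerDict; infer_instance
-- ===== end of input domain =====

-- B replaces A's quadratic join (for every key of get_group_id_title, scan all of DbrefsIdAndIP)
-- by a reverse index value→keys and then groups by each distinct org via filtering; return values only.

-- 'cash-' + str(fsrar[1:]) + '-' + str(fsrar[1:]) + '1'  (shared by both Pythons, ported once)
def fsrarEdit (fsrar : String) : String :=
  let rest := PySem.Str.slice fsrar (some 1) none
  "cash-" ++ rest ++ "-" ++ rest ++ "1"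

-- ===== PORT A =====
-- The Python arguments are dicts; PySem.Dict.ofList is dict(pairs) (last value wins, first position kept).
def innerDict (get_group_id_title : List (String × String)) (DbrefsIdAndIP : List (String × String)) : (List (String × List String)) × (List (String × List String)) :=
  let g := PySem.Dict.ofList get_group_id_title
  let d := PySem.Dict.ofList DbrefsIdAndIP
  -- for i in get_group_id_title: for j in DbrefsIdAndIP: if i == DbrefsIdAndIP[j]: glossary[j] = get_group_id_title[i]
  let glossary : PySem.Dict String String :=
    g.items.foldl (fun gl i =>
      d.items.foldl (fun gl j => if i.1 == j.2 then gl.insert j.1 i.2 else gl) gl)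
      PySem.Dict.empty
  -- for fsrar in glossary: …
  let res : PySem.Dict String (List String) × PySem.Dict String (List String) :=
    glossary.items.foldl (fun r p =>
      let fsrar_edit := fsrarEdit p.1
      let re := if r.1.contains p.2 then r.1.modify p.2 [] (· ++ [fsrar_edit]) else r.1.insert p.2 [fsrar_edit]
      let ro := if r.2.contains p.2 then r.2.modify p.2 [] (· ++ [p.1]) else r.2.insert p.2 [p.1]
      (re, ro)) (PySem.Dict.empty, PySem.Dict.empty)
  (res.1.items, res.2.items)

-- ===== PORT B =====
def innerDict_alt (get_group_id_title : List (String × String)) (DbrefsIdAndIP : List (String × String)) : (List (String × List String)) × (List (String × List String)) :=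
  let g := PySem.Dict.ofList get_group_id_title
  let d := PySem.Dict.ofList DbrefsIdAndIP
  -- rev.setdefault(ip, []).append(j)
  let rev : PySem.Dict String (List String) :=
    d.items.foldl (fun r j => r.modify j.2 [] (· ++ [j.1])) PySem.Dict.empty
  -- pairs = [(f, org) for i, org in get_group_id_title.items() for f in rev.get(i, [])]
  let pairs : List (String × String) :=
    g.items.flatMap (fun i => (rev.getD i.1 []).map (fun f => (f, i.2)))
  -- for _, org in pairs: if org not in orgs: orgs.append(org)  — first occurrences, in order
  let orgs : PySem.Set String := PySem.Set.ofList (pairs.map (·.2))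
  -- {org: [f for f, o in pairs if o == org] for org in orgs}
  let orig : List (String × List String) :=
    orgs.map (fun o => (o, (pairs.filter (fun p => p.2 == o)).map (·.1)))
  -- {org: ['cash-' + f[1:] + '-' + f[1:] + '1' for f in fs] for org, fs in …items()}
  let edit : List (String × List String) :=
    orig.map (fun p => (p.1, p.2.map (fun f => fsrarEdit f)))
  (edit, orig)

-- ===== PRECONDITION & SPEC =====
def Spec_innerDict (get_group_id_title : List (String × String)) (DbrefsIdAndIP : List (String × String)) (out : (List (String × List String)) × (List (String × List String))) : Prop := out = innerDict_alt get_group_id_title DbrefsIdAndIP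
instance (get_group_id_title : List (String × String)) (DbrefsIdAndIP : List (String × String)) (out : (List (String × List String)) × (List (String × List String))) : Decidable (Spec_innerDict get_group_id_title DbrefsIdAndIP out) := by unfold Spec_innerDict; infer_instance

-- ===== CLAIM (what is proved, stated in full; the proofs are below) =====
def Claim_equal_innerDict : Prop := ∀ (get_group_id_title : List (String × String)) (DbrefsIdAndIP : List (String × String)), Dom_innerDict get_group_id_title DbrefsIdAndIP → Spec_innerDict get_group_id_title DbrefsIdAndIP (innerDict get_group_id_title DbrefsIdAndIP)

-- ===== LEMMAS AND PROOFS =====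

-- the (fsrar, org) pairs contributed by one entry i of get_group_id_title, in DbrefsIdAndIP order
def emitFor (D : List (String × String)) (i : String × String) : List (String × String) :=
  (D.filter (fun j => i.1 == j.2)).map (fun j => (j.1, i.2))

-- the grouping both programs end up computing for one output dict (value extractor v)
def groupedBy (P : List (String × String)) (v : String × String → String) : List (String × List String) :=
  (PySem.Set.ofList (P.map (·.2))).map (fun o => (o, (P.filter (fun p => p.2 == o)).map v))

theorem emitFor_keys (D : List (String × String)) (i : String × String) :
    (emitFor D i).map (·.1) = (D.filter (fun j => i.1 == j.2)).map (·.1) := by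
  simp [emitFor, List.map_map, Function.comp_def]

theorem inner_fold_eq (D : List (String × String)) (i : String × String) (gl : PySem.Dict String String) :
    D.foldl (fun gl j => if i.1 == j.2 then gl.insert j.1 i.2 else gl) gl
      = (emitFor D i).foldl (fun gl p => gl.insert p.1 p.2) gl := by
  simp only [emitFor]
  induction D generalizing gl with
  | nil => rfl
  | cons j D ih =>
      simp only [List.foldl_cons, List.filter_cons]
      by_cases h : i.1 = j.2
      · rw [if_pos (show (i.1 == j.2) = true by simp [h]), if_pos (show (i.1 == j.2) = true by simp [h]),
          List.map_cons, List.foldl_cons]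
        exact ih _
      · rw [if_neg (show ¬ (i.1 == j.2) = true by simp [h]), if_neg (show ¬ (i.1 == j.2) = true by simp [h])]
        exact ih _

theorem outer_fold_items (D : List (String × String)) (hD : (D.map (·.1)).Nodup)
    (L : List (String × String)) (hL : (L.map (·.1)).Nodup)
    (gl : PySem.Dict String String) (hglk : gl.keys.Nodup)
    (hfresh : ∀ i ∈ L, ∀ p ∈ emitFor D i, gl.contains p.1 = false) :
    (L.foldl (fun gl i => (emitFor D i).foldl (fun gl p => gl.insert p.1 p.2) gl) gl).items
      = gl.items ++ L.flatMap (emitFor D) := by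
  induction L generalizing gl with
  | nil => simp
  | cons i L ih =>
      rw [List.map_cons, List.nodup_cons] at hL
      obtain ⟨hnotin, hL'⟩ := hL
      have hkeysNodup : ((emitFor D i).map (·.1)).Nodup := by
        rw [emitFor_keys]
        exact hD.sublist (List.filter_sublist.map _)
      have hstep : ((emitFor D i).foldl (fun gl p => gl.insert p.1 p.2) gl).items
          = gl.items ++ emitFor D i := by
        have h := PySem.Dict.items_foldl_insert_fresh (emitFor D i) (·.1) (·.2) gl
          (fun a ha => hfresh i List.mem_cons_self a ha) hkeysNodup
        simpa using h
      have hkeys : ((emitFor D i).foldl (fun gl p => gl.insert p.1 p.2) gl).keys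
          = gl.keys ++ (emitFor D i).map (·.1) := by
        simp only [PySem.Dict.keys, hstep, List.map_append]
      rw [List.foldl_cons, List.flatMap_cons, ← List.append_assoc, ← hstep]
      apply ih hL'
      · rw [hkeys]
        refine List.Nodup.append hglk hkeysNodup ?_
        intro k hk1 hk2
        rw [emitFor_keys] at hk2
        obtain ⟨q, hq, hqk⟩ := List.mem_map.mp hk2
        have hc := hfresh i List.mem_cons_self (q.1, i.2) (List.mem_map.mpr ⟨q, hq, rfl⟩)
        rw [hqk] at hc
        exact absurd ((PySem.Dict.contains_iff_mem_keys _ _).mpr hk1) (by simp [hc])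
      · intro i' hi' p hp
        rw [← Bool.not_eq_true, PySem.Dict.contains_iff_mem_keys, hkeys, List.mem_append]
        rintro (h | h)
        · have hc := hfresh i' (List.mem_cons_of_mem _ hi') p hp
          exact absurd ((PySem.Dict.contains_iff_mem_keys _ _).mpr h) (by simp [hc])
        · rw [emitFor_keys] at h
          obtain ⟨q, hq, hqk⟩ := List.mem_map.mp h
          obtain ⟨hqD, hqv⟩ := List.mem_filter.mp hq
          obtain ⟨q', hq', hq'e⟩ := List.mem_map.mp hp
          obtain ⟨hq'D, hq'v⟩ := List.mem_filter.mp hq'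
          have hp1 : p.1 = q'.1 := by rw [← hq'e]
          have hqq' : q = q' := List.inj_on_of_nodup_map hD hqD hq'D (by rw [hqk, hp1])
          apply hnotin
          have h1 : i.1 = q.2 := by simpa using hqv
          have h2 : i'.1 = q'.2 := by simpa using hq'v
          rw [show i.1 = i'.1 by rw [h1, h2, hqq']]
          exact List.mem_map.mpr ⟨i', hi', rfl⟩

theorem modify_not_contains {ν : Type} (r : PySem.Dict String ν) (k : String) (d0 : ν) (f : ν → ν)
    (h : r.contains k = false) : r.modify k d0 f = r.insert k (f d0) := by
  simp [PySem.Dict.modify, PySem.Dict.getD_of_not_contains r d0 h]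

-- the items of a group-append loop are the distinct keys with their filtered runs
theorem foldl_modify_items (L : List (String × String)) (v : String × String → String) :
    (L.foldl (fun r p => r.modify p.2 [] (· ++ [v p])) PySem.Dict.empty).items
      = groupedBy L v := by
  have hmap : L.foldl (fun (r : PySem.Dict String (List String)) p => r.modify p.2 [] (· ++ [v p])) PySem.Dict.empty
      = (L.map (fun p => (p.2, v p))).foldl (fun r q => r.modify q.1 [] (· ++ [q.2])) PySem.Dict.empty := by
    rw [List.foldl_map]
  have hnodup : (L.foldl (fun (r : PySem.Dict String (List String)) p => r.modify p.2 [] (· ++ [v p])) PySem.Dict.empty).keys.Nodup := by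
    exact PySem.Dict.nodup_keys_foldl_modify_key L (·.2) [] (fun _ p => (· ++ [v p])) PySem.Dict.empty (by simp)
  have hkeys : (L.foldl (fun (r : PySem.Dict String (List String)) p => r.modify p.2 [] (· ++ [v p])) PySem.Dict.empty).keys
      = PySem.Set.ofList (L.map (·.2)) := by
    have h := PySem.Dict.keys_foldl_modify_key L (·.2) [] (fun _ p => (· ++ [v p])) PySem.Dict.empty
    simpa [PySem.Set.update_nil_left] using h
  have hget : ∀ o, (L.foldl (fun (r : PySem.Dict String (List String)) p => r.modify p.2 [] (· ++ [v p])) PySem.Dict.empty).getD o []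
      = (L.filter (fun p => p.2 == o)).map v := by
    intro o
    rw [hmap, PySem.Dict.getD_foldl_modify_append]
    simp [List.filter_map, List.map_map, Function.comp_def]
  rw [PySem.Dict.items_eq_map_keys _ hnodup [], hkeys, groupedBy]
  exact List.map_congr_left (fun o _ => by rw [hget o])

-- ===== A = groupedBy =====
theorem A_eq_grouped (G D : List (String × String)) :
    innerDict G D =
      (groupedBy ((PySem.Dict.ofList G).items.flatMap (emitFor (PySem.Dict.ofList D).items)) (fun p => fsrarEdit p.1),
       groupedBy ((PySem.Dict.ofList G).items.flatMap (emitFor (PySem.Dict.ofList D).items)) (·.1)) := by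
  unfold innerDict
  dsimp only
  -- phase 1: glossary.items = the joined pairs, in order
  have h1 := PySem.List.foldl_congr_mem (PySem.Dict.ofList G).items
    (fun gl i => (PySem.Dict.ofList D).items.foldl (fun gl j => if i.1 == j.2 then gl.insert j.1 i.2 else gl) gl)
    (fun gl i => (emitFor (PySem.Dict.ofList D).items i).foldl (fun gl p => gl.insert p.1 p.2) gl)
    PySem.Dict.empty (fun gl i _ => inner_fold_eq _ _ _)
  have h2 := outer_fold_items (PySem.Dict.ofList D).items
    (by simpa [PySem.Dict.keys] using PySem.Dict.nodup_keys_ofList (κ := String) (ν := String) D)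
    (PySem.Dict.ofList G).items
    (by simpa [PySem.Dict.keys] using PySem.Dict.nodup_keys_ofList (κ := String) (ν := String) G)
    PySem.Dict.empty (by simp) (by simp)
  rw [h1, show (List.foldl (fun gl i => (emitFor (PySem.Dict.ofList D).items i).foldl (fun gl p => gl.insert p.1 p.2) gl)
      PySem.Dict.empty (PySem.Dict.ofList G).items).items
      = (PySem.Dict.ofList G).items.flatMap (emitFor (PySem.Dict.ofList D).items) from by simpa using h2]
  -- phase 2: the contains-guarded step is modify; split the two accumulators and group
  have hstep := PySem.List.foldl_congr_mem
    ((PySem.Dict.ofList G).items.flatMap (emitFor (PySem.Dict.ofList D).items))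
    (fun (r : PySem.Dict String (List String) × PySem.Dict String (List String)) p =>
      ((if r.1.contains p.2 then r.1.modify p.2 [] (· ++ [fsrarEdit p.1]) else r.1.insert p.2 [fsrarEdit p.1]),
       (if r.2.contains p.2 then r.2.modify p.2 [] (· ++ [p.1]) else r.2.insert p.2 [p.1])))
    (fun r p => (r.1.modify p.2 [] (· ++ [fsrarEdit p.1]), r.2.modify p.2 [] (· ++ [p.1])))
    (PySem.Dict.empty, PySem.Dict.empty)
    (by
      intro r p _
      have e1 : (if r.1.contains p.2 then r.1.modify p.2 [] (· ++ [fsrarEdit p.1]) else r.1.insert p.2 [fsrarEdit p.1])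
          = r.1.modify p.2 [] (· ++ [fsrarEdit p.1]) := by
        cases h : r.1.contains p.2
        · simp [modify_not_contains _ _ _ _ h]
        · simp
      have e2 : (if r.2.contains p.2 then r.2.modify p.2 [] (· ++ [p.1]) else r.2.insert p.2 [p.1])
          = r.2.modify p.2 [] (· ++ [p.1]) := by
        cases h : r.2.contains p.2
        · simp [modify_not_contains _ _ _ _ h]
        · simp
      show (_, _) = (_, _)
      rw [e1, e2])
  have hsplit := PySem.List.foldl_prod_mk
    (fun (r : PySem.Dict String (List String)) (p : String × String) => r.modify p.2 [] (· ++ [fsrarEdit p.1]))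
    (fun (r : PySem.Dict String (List String)) (p : String × String) => r.modify p.2 [] (· ++ [p.1]))
    ((PySem.Dict.ofList G).items.flatMap (emitFor (PySem.Dict.ofList D).items))
    PySem.Dict.empty PySem.Dict.empty
  rw [hstep, hsplit]
  rw [foldl_modify_items _ (fun p => fsrarEdit p.1), foldl_modify_items _ (·.1)]

-- ===== B = groupedBy =====
theorem B_eq_grouped (G D : List (String × String)) :
    innerDict_alt G D =
      (groupedBy ((PySem.Dict.ofList G).items.flatMap (emitFor (PySem.Dict.ofList D).items)) (fun p => fsrarEdit p.1),
       groupedBy ((PySem.Dict.ofList G).items.flatMap (emitFor (PySem.Dict.ofList D).items)) (·.1)) := by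
  unfold innerDict_alt
  dsimp only
  -- the reverse index looked up at c is the join's matches for c, in order
  have hrev : ∀ c, ((PySem.Dict.ofList D).items.foldl (fun r j => r.modify j.2 [] (· ++ [j.1])) PySem.Dict.empty).getD c []
      = ((PySem.Dict.ofList D).items.filter (fun j => j.2 == c)).map (·.1) := by
    intro c
    have hsw : (PySem.Dict.ofList D).items.foldl (fun r j => r.modify j.2 [] (· ++ [j.1])) PySem.Dict.empty
        = ((PySem.Dict.ofList D).items.map Prod.swap).foldl
            (fun (r : PySem.Dict String (List String)) p => r.modify p.1 [] (· ++ [p.2])) PySem.Dict.empty := by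
      rw [List.foldl_map]; rfl
    rw [hsw, PySem.Dict.getD_foldl_modify_append]
    simp [List.filter_map, Function.comp_def, List.map_map]
  have hpairs : (PySem.Dict.ofList G).items.flatMap
        (fun i => (((PySem.Dict.ofList D).items.foldl (fun r j => r.modify j.2 [] (· ++ [j.1])) PySem.Dict.empty).getD i.1 []).map (fun f => (f, i.2)))
      = (PySem.Dict.ofList G).items.flatMap (emitFor (PySem.Dict.ofList D).items) := by
    apply congrFun (congrArg List.flatMap ?_) _
    funext i
    rw [hrev, emitFor]
    rw [show ((PySem.Dict.ofList D).items.filter (fun j => j.2 == i.1))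
        = ((PySem.Dict.ofList D).items.filter (fun j => i.1 == j.2)) from
      List.filter_congr (fun j _ => by
        by_cases h : i.1 = j.2
        · simp [h]
        · simp [h, Ne.symm h])]
    simp [List.map_map, Function.comp_def]
  rw [hpairs]
  -- edit is orig with fsrarEdit mapped over each run
  simp only [groupedBy, List.map_map, Function.comp_def]

-- ===== VERDICT (by name: the statement is the Claim_ definition above) =====
theorem innerDict_spec : Claim_equal_innerDict := by
  intro G D _
  show innerDict G D = innerDict_alt G D
  rw [A_eq_grouped, B_eq_grouped]
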